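-- pv_equiv track=rewrite | github.com/ivanwakeup/algorithms | algorithms/prep/microsoft/min_steps_equal_height_boxes.py | min_steps_equal_boxes
-- ===== SOURCE A (Python) =====
-- import heapq
--
-- def min_steps_equal_boxes(boxes):
--     heap = [-x for x in boxes]
--     heapq.heapify(heap)
--     result = 0
--     popped = 0
--     last = -heapq.heappop(heap)
--     while heap:
--         nxt = -heapq.heappop(heap)
--         popped+=1
--         if last > nxt:
--             result+=popped
--             last = nxt
--     return result
-- ===== SOURCE B (Python) =====
-- def min_steps_equal_boxes(boxes):
--     mx = max(boxes)
--     return sum(sum(1 for x in boxes if x > v) for v in set(boxes) if v < mx)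
-- ===== Notes on version B (the rewrite author's own statement) =====
-- stated objective: alternative
-- what changed: Replaces the heapify/heappop loop with positional accumulators (result, popped, last) by a counting formulation with no ordering at all: for every distinct height below the maximum, add the number of boxes strictly above that height.
import Mathlib
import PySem

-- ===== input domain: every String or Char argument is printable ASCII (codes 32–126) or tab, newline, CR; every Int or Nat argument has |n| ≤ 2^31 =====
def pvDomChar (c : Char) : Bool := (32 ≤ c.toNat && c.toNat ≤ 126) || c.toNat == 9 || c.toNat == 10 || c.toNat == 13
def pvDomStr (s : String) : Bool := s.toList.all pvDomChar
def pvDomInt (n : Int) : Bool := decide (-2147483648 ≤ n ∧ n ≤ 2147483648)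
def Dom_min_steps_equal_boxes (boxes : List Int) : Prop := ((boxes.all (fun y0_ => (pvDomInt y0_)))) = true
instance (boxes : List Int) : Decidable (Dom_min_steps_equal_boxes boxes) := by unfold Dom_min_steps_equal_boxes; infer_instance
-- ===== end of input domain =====

-- B drops A's heap/pop loop with positional accumulators for an order-free counting rule:
-- for each distinct height below the maximum, add the number of boxes strictly above it
-- (objective: alternative). A mutates no caller-visible state (the heap is local).

-- ===== PORT A =====
-- heapq on the negated values: heappop returns (and removes) the minimum element of the
-- heap; we model the heap as the plain list and heappop as min?-then-erase (first
-- occurrence of the minimum).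
def aLoop (heap : List Int) (result popped last : Int) : Int :=
  match hm : PySem.List.min? heap (fun x => x) with
  | none => result                                   -- 'while heap' exits
  | some m =>
      let nxt := -m                                  -- nxt = -heappop(heap)
      let popped' := popped + 1
      if last > nxt then
        aLoop (heap.erase m) (result + popped') popped' nxt
      else
        aLoop (heap.erase m) result popped' last
termination_by heap.length
decreasing_by
  all_goals
    have h1 := List.length_erase_of_mem (PySem.List.min?_mem hm)
    have h2 := List.length_pos_of_mem (PySem.List.min?_mem hm)
    omega

def min_steps_equal_boxes (boxes : List Int) : Int :=
  let heap := boxes.map (fun x => -x)                -- heap = [-x for x in boxes]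
  match PySem.List.min? heap (fun x => x) with
  | none => 0                                        -- heappop raises IndexError: outside Pre_
  | some m => aLoop (heap.erase m) 0 0 (-m)          -- last = -heappop(heap); then the while loop

-- ===== PORT B =====
def min_steps_equal_boxes_alt (boxes : List Int) : Int :=
  match PySem.List.max? boxes (fun x => x) with
  | none => 0                                        -- max([]) raises ValueError: outside Pre_
  | some mx =>
      -- sum(sum(1 for x in boxes if x > v) for v in set(boxes) if v < mx)
      (((PySem.Set.ofList boxes).filter (fun v => decide (v < mx))).map
        (fun v => ((boxes.filter (fun x => decide (v < x))).length : Int))).sum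

-- ===== PRECONDITION & SPEC =====
-- A raises IndexError (heappop from an empty heap) on the empty list (B's max raises there
-- too); Pre_ excludes exactly the empty input.
def Pre_min_steps_equal_boxes (boxes : List Int) : Prop := boxes ≠ []
instance (boxes : List Int) : Decidable (Pre_min_steps_equal_boxes boxes) := by
  unfold Pre_min_steps_equal_boxes; infer_instance

def pvWitness_min_steps_equal_boxes : List Int := [2, 1, 1]

def Spec_min_steps_equal_boxes (boxes : List Int) (out : Int) : Prop := out = min_steps_equal_boxes_alt boxes
instance (boxes : List Int) (out : Int) : Decidable (Spec_min_steps_equal_boxes boxes out) := by unfold Spec_min_steps_equal_boxes; infer_instance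

-- ===== CLAIM (what is proved, stated in full; the proofs are below) =====
def Claim_equal_min_steps_equal_boxes : Prop := ∀ (boxes : List Int), Dom_min_steps_equal_boxes boxes → Pre_min_steps_equal_boxes boxes → Spec_min_steps_equal_boxes boxes (min_steps_equal_boxes boxes)

-- ===== LEMMAS AND PROOFS =====

-- The weight of the strict drops along a chain prev :: vs, an element contributing its
-- 1-based position (offset p) when it strictly drops below its predecessor.
def chain : Int → List Int → Int → Int
  | _, [], _ => 0
  | prev, v :: t, p => (if v < prev then p + 1 else 0) + chain v t (p + 1)

-- A's while loop re-expressed structurally over the ascending pop order.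
def scanA : List Int → Int → Int → Int → Int
  | [], r, _, _ => r
  | m :: t, r, p, last =>
      if last > -m then scanA t (r + (p + 1)) (p + 1) (-m) else scanA t r (p + 1) last

lemma sorted_cons_min (h : List Int) (m : Int)
    (hm : PySem.List.min? h (fun x => x) = some m) :
    PySem.List.sorted h (fun x => x) false =
      m :: PySem.List.sorted (h.erase m) (fun x => x) false := by
  apply PySem.List.sorted_id_eq_of_perm_of_pairwise
  · exact ((PySem.List.sorted_perm _ _ _).cons m).trans
      (List.perm_cons_erase (PySem.List.min?_mem hm)).symm
  · exact List.pairwise_cons.2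
      ⟨fun y hy => PySem.List.min?_isMin hm y
          (List.mem_of_mem_erase ((PySem.List.mem_sorted _ _ _ _).1 hy)),
        PySem.List.sorted_pairwise _ _⟩

lemma aLoop_eq_scanA (h : List Int) (r p last : Int) :
    aLoop h r p last = scanA (PySem.List.sorted h (fun x => x) false) r p last := by
  induction hlen : h.length using Nat.strong_induction_on generalizing h r p last with
  | _ n ih =>
    cases hm : PySem.List.min? h (fun x => x) with
    | none =>
        have he : h = [] := (PySem.List.min?_eq_none_iff _ _).1 hm
        subst he
        rw [aLoop]
        split
        · rfl
        · rename_i m heq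
          cases hm.symm.trans heq
    | some m =>
        have hmem := PySem.List.min?_mem hm
        have hlt : (h.erase m).length < n := by
          have h1 := List.length_erase_of_mem hmem
          have h2 := List.length_pos_of_mem hmem
          omega
        rw [sorted_cons_min h m hm, aLoop]
        split
        · rename_i heq
          cases hm.symm.trans heq
        · rename_i m' heq
          have hm' : m' = m := by
            have := hm.symm.trans heq
            injection this with h'
            exact h'.symm
          subst hm'
          simp only [scanA]
          split
          · exact ih _ hlt _ _ _ _ rfl
          · exact ih _ hlt _ _ _ _ rfl

lemma scanA_eq_chain (l : List Int) (r p prev : Int)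
    (hub : ∀ x ∈ l, prev ≥ -x) (hsort : l.Pairwise (· ≤ ·)) :
    scanA l r p prev = r + chain prev (l.map (fun x => -x)) p := by
  induction l generalizing r p prev with
  | nil => simp [scanA, chain]
  | cons m t ih =>
    have hub' := hub m (by simp)
    rcases List.pairwise_cons.1 hsort with ⟨hmt, ht⟩
    by_cases hgt : prev > -m
    · rw [scanA]
      simp only [if_pos hgt]
      rw [ih _ _ _ (fun x hx => by have := hmt x hx; omega) ht]
      simp only [List.map_cons, chain, if_pos hgt]
      ring
    · have heq : prev = -m := by omega
      rw [scanA]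
      simp only [if_neg hgt]
      rw [ih _ _ _ (fun x hx => by have := hmt x hx; omega) ht]
      simp only [List.map_cons, chain]
      rw [if_neg (by omega), heq]
      ring

-- the count of elements of l strictly above v, as an Int
def cntAbove (l : List Int) (v : Int) : Int :=
  ((l.filter (fun x => decide (v < x))).length : Int)

-- chain over a nonincreasing list = the counting formula: every distinct value below prev
-- contributes (offset p) + (number of elements of l above it) + 1.
lemma chain_eq_sum (l : List Int) (prev p : Int)
    (hub : ∀ x ∈ l, x ≤ prev) (hsort : l.Pairwise (· ≥ ·)) :
    chain prev l p =
      ∑ v ∈ l.toFinset.filter (· < prev), (p + cntAbove l v + 1) := by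
  induction l generalizing prev p with
  | nil => simp [chain]
  | cons a t ih =>
    have ha : a ≤ prev := hub a (by simp)
    rcases List.pairwise_cons.1 hsort with ⟨hat, ht⟩
    have hcnt : ∀ v : Int, v < a → cntAbove (a :: t) v = cntAbove t v + 1 := by
      intro v hv
      unfold cntAbove
      have hfil : (a :: t).filter (fun x => decide (v < x))
          = a :: t.filter (fun x => decide (v < x)) := by
        simp [hv]
      rw [hfil, List.length_cons]
      push_cast
      ring
    have hcnta : cntAbove (a :: t) a = 0 := by
      have hnil : (a :: t).filter (fun x => decide (a < x)) = [] := by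
        apply List.filter_eq_nil_iff.2
        intro x hx
        rcases List.mem_cons.1 hx with rfl | hx'
        · simp
        · have := hat x hx'; simp; omega
      simp [cntAbove, hnil]
    by_cases hlt : a < prev
    · have hins : (a :: t).toFinset.filter (· < prev)
          = insert a (t.toFinset.filter (· < prev)) := by
        simp [List.toFinset_cons, Finset.filter_insert, hlt]
      have herase : (t.toFinset.filter (· < prev)).erase a
          = t.toFinset.filter (· < a) := by
        ext v
        simp only [Finset.mem_erase, Finset.mem_filter, List.mem_toFinset]
        constructor
        · rintro ⟨hne, hv, _⟩
          exact ⟨hv, lt_of_le_of_ne (hat v hv) hne⟩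
        · rintro ⟨hv, hva⟩
          exact ⟨ne_of_lt hva, hv, lt_trans hva hlt⟩
      have hsum : ∑ v ∈ t.toFinset.filter (· < a), (p + cntAbove (a :: t) v + 1)
          = ∑ v ∈ t.toFinset.filter (· < a), (p + 1 + cntAbove t v + 1) := by
        apply Finset.sum_congr rfl
        intro v hv
        rcases Finset.mem_filter.1 hv with ⟨_, hva⟩
        rw [hcnt v hva]
        ring
      rw [chain, if_pos hlt, ih a (p + 1) (fun x hx => hat x hx) ht, hins,
          ← Finset.add_sum_erase _ _ (Finset.mem_insert_self a _),
          Finset.erase_insert_eq_erase, herase, hsum, hcnta]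
      ring
    · have haeq : a = prev := le_antisymm ha (by omega)
      subst haeq
      have hfil : (a :: t).toFinset.filter (· < a)
          = t.toFinset.filter (· < a) := by
        simp [List.toFinset_cons, Finset.filter_insert]
      have hsum : ∑ v ∈ t.toFinset.filter (· < a), (p + cntAbove (a :: t) v + 1)
          = ∑ v ∈ t.toFinset.filter (· < a), (p + 1 + cntAbove t v + 1) := by
        apply Finset.sum_congr rfl
        intro v hv
        rcases Finset.mem_filter.1 hv with ⟨_, hva⟩
        rw [hcnt v hva]
        ring
      rw [chain, if_neg (by omega), ih a (p + 1) (fun x hx => hat x hx) ht, hfil, hsum]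
      ring

-- sorting the negated list ascending is the negation of sorting descending
lemma sorted_neg (boxes : List Int) :
    PySem.List.sorted (boxes.map (fun x => -x)) (fun x => x) false =
      (PySem.List.sorted boxes (fun x => x) true).map (fun x => -x) := by
  apply PySem.List.sorted_id_eq_of_perm_of_pairwise
  · exact (PySem.List.sorted_perm _ _ _).map _
  · have := PySem.List.sorted_pairwise_rev boxes (fun x => x)
    exact List.Pairwise.map _ (fun a b hab => by simpa using neg_le_neg hab) this

-- B's nodup-list sum as a Finset sum over the same filter
lemma alt_eq_finset_sum (boxes : List Int) (mx : Int) :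
    (((PySem.Set.ofList boxes).filter (fun v => decide (v < mx))).map
        (fun v => ((boxes.filter (fun x => decide (v < x))).length : Int))).sum
      = ∑ v ∈ boxes.toFinset.filter (· < mx), cntAbove boxes v := by
  have hnd : ((PySem.Set.ofList boxes).filter (fun v => decide (v < mx))).Nodup :=
    (PySem.Set.nodup_ofList boxes).filter _
  have htf : ((PySem.Set.ofList boxes).filter (fun v => decide (v < mx))).toFinset
      = boxes.toFinset.filter (· < mx) := by
    ext v
    simp [PySem.Set.mem_ofList]
  rw [← List.sum_toFinset _ hnd, htf]
  rfl

-- ===== VERDICT (by name: the statement is the Claim_ definition above) =====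
theorem min_steps_equal_boxes_spec : Claim_equal_min_steps_equal_boxes := by
  intro boxes _ hpre
  unfold Spec_min_steps_equal_boxes min_steps_equal_boxes min_steps_equal_boxes_alt
  have hsne : PySem.List.sorted boxes (fun x => x) true ≠ [] := by
    simpa [PySem.List.sorted_eq_nil_iff] using hpre
  obtain ⟨c, rest, hs⟩ := List.exists_cons_of_ne_nil hsne
  have hneg := sorted_neg boxes
  rw [hs] at hneg
  simp only [List.map_cons] at hneg
  have hhne : boxes.map (fun x => -x) ≠ [] := by simpa using hpre
  -- the first heappop returns -c, c being the head of the descending sort of boxes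
  obtain ⟨m, hm⟩ : ∃ m, PySem.List.min? (boxes.map (fun x => -x)) (fun x => x) = some m := by
    cases hmm : PySem.List.min? (boxes.map (fun x => -x)) (fun x => x) with
    | none => exact absurd ((PySem.List.min?_eq_none_iff _ _).1 hmm) hhne
    | some m => exact ⟨m, rfl⟩
  have hxmem : -c ∈ boxes.map (fun x => -x) := by
    have hmem : -c ∈ PySem.List.sorted (boxes.map (fun x => -x)) (fun x => x) false := by
      rw [hneg]; simp
    exact (PySem.List.mem_sorted _ _ _ _).1 hmem
  have h1 : m ≤ -c := PySem.List.min?_isMin hm (-c) hxmem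
  have h2 : -c ≤ m := PySem.List.key_head_sorted_le _ _ hneg m (PySem.List.min?_mem hm)
  have hmx : m = -c := le_antisymm h1 h2
  subst hmx
  -- max(boxes) = c
  obtain ⟨mxv, hmxv⟩ : ∃ mxv, PySem.List.max? boxes (fun x => x) = some mxv := by
    cases hmm : PySem.List.max? boxes (fun x => x) with
    | none => exact absurd ((PySem.List.max?_eq_none_iff _ _).1 hmm) hpre
    | some mxv => exact ⟨mxv, rfl⟩
  have hcb : c ∈ boxes := by
    have : c ∈ PySem.List.sorted boxes (fun x => x) true := by rw [hs]; simp
    exact (PySem.List.mem_sorted _ _ _ _).1 this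
  have hmax1 : mxv ≤ c := PySem.List.key_head_sorted_rev_ge _ _ hs mxv (PySem.List.max?_mem hmxv)
  have hmax2 : c ≤ mxv := PySem.List.max?_isMax hmxv c hcb
  have hmxv' : PySem.List.max? boxes (fun x => x) = some c := by
    rw [hmxv, le_antisymm hmax1 hmax2]
  have hpw := PySem.List.sorted_pairwise_rev boxes (fun x => x)
  rw [hs] at hpw
  rcases List.pairwise_cons.1 hpw with ⟨hxr, hrr⟩
  have hrest : PySem.List.sorted ((boxes.map (fun x => -x)).erase (-c)) (fun x => x) false
      = rest.map (fun x => -x) := by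
    have h3 := hneg.symm.trans (sorted_cons_min (boxes.map (fun x => -x)) (-c) hm)
    injection h3 with _ hr
    exact hr.symm
  simp only [hm, hmxv', aLoop_eq_scanA, hrest, neg_neg]
  rw [scanA_eq_chain _ 0 0 c
      (fun y hy => by
        obtain ⟨v, hv, rfl⟩ := List.mem_map.1 hy
        have := hxr v hv
        omega)
      (List.Pairwise.map _ (fun a b hab => by simpa using neg_le_neg hab) hrr)]
  have hid : (rest.map (fun v => -v)).map (fun v => -v) = rest := by simp
  rw [hid, chain_eq_sum rest c 0 (fun x hx => hxr x hx) hrr, alt_eq_finset_sum]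
  -- relate the two Finset sums via the permutation boxes ~ c :: rest
  have hperm : (c :: rest).Perm boxes := by
    rw [← hs]; exact PySem.List.sorted_perm _ _ _
  have hfinset : boxes.toFinset = insert c rest.toFinset := by
    ext v
    rw [← List.toFinset_cons]
    simp only [List.mem_toFinset]
    exact hperm.mem_iff.symm
  have hfilter : boxes.toFinset.filter (· < c) = rest.toFinset.filter (· < c) := by
    rw [hfinset]
    simp [Finset.filter_insert]
  have hterm : ∀ v ∈ rest.toFinset.filter (· < c),
      cntAbove boxes v = 0 + cntAbove rest v + 1 := by
    intro v hv
    rcases Finset.mem_filter.1 hv with ⟨_, hvc⟩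
    have hp : cntAbove boxes v = cntAbove (c :: rest) v := by
      unfold cntAbove
      rw [(hperm.filter _).length_eq]
    have hfil : (c :: rest).filter (fun x => decide (v < x))
        = c :: rest.filter (fun x => decide (v < x)) := by
      simp [hvc]
    rw [hp]
    unfold cntAbove
    rw [hfil, List.length_cons]
    push_cast
    ring
  rw [hfilter, Finset.sum_congr rfl hterm]
  ring
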